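-- pv_equiv track=rewrite | github.com/danieljhkim/DataStructures-Algorithms | python/algorithms/math/numbers.py | count_symmetric_nums2
-- ===== SOURCE A (Python) =====
-- def count_symmetric_nums2(LOW, HIGH):
--     def generate_same_digit_numbers(digit, length):
--         return int(str(digit) * length)
--
--     count = 0
--     for digit in range(1, 10):  # Digits from 1 to 9
--         length = 1
--         while True:
--             num = generate_same_digit_numbers(digit, length)
--             if num > HIGH:
--                 break
--             if num >= LOW:
--                 count += 1
--             length += 1
--
--     return count
-- ===== SOURCE B (Python) =====
-- def count_symmetric_nums2(LOW, HIGH):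
--     # length-major: for each repunit R = 1, 11, 111, ... count digits d in 1..9
--     # with LOW <= d*R <= HIGH in closed form (interval count), no inner loop.
--     count = 0
--     R = 1
--     while R <= HIGH:
--         lo = max(1, -(-LOW // R))   # ceil(LOW / R), clamped to >= 1
--         hi = min(9, HIGH // R)      # floor(HIGH / R), clamped to <= 9
--         if lo <= hi:
--             count += hi - lo + 1
--         R = R * 10 + 1
--     return count
-- ===== Notes on version B (the rewrite author's own statement) =====
-- stated objective: alternative
-- what changed: Replaced A's digit-major nested loop (inner while building each repdigit via string repetition and parsing) by a single length-major loop over repunits R=1,11,111,... that counts the qualifying digits per length with a closed-form ceil/floor interval count, removing the inner loop and all string work.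
import Mathlib
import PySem

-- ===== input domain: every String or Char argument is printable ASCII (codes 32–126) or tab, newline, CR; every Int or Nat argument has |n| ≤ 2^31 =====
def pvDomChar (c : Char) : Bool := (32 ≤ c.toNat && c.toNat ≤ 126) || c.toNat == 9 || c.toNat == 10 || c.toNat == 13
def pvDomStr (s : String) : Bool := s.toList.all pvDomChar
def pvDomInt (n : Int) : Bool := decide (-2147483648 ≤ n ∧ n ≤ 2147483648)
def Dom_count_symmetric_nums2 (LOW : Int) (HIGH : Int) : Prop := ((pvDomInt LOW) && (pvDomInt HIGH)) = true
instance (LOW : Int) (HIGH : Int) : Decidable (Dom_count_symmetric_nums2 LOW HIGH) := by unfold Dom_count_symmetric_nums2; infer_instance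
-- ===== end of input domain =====

-- B replaces A's per-digit inner while loop by a length-major loop with a closed-form
-- interval count of the digits (objective: simpler/faster constant).

-- ===== PORT A =====
-- int(str(digit) * length): str(n) → PySem.Int.toChars, '*' on str → PySem.List.pyRepeat,
-- int(s) → PySem.Int.ofChars? (always parses here: digit ∈ 1..9, length ≥ 1, so getD 0 is unreached)
def pvGenSame (digit : Int) (length : Int) : Int :=
  (PySem.Int.ofChars? (PySem.List.pyRepeat (PySem.Int.toChars digit) length)).getD 0

-- the 'while True' loop; fuel is a pure totality guard (the loop runs ≤ 11 iterations for |HIGH| ≤ 2^31)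
def pvLoopA (LOW HIGH digit : Int) (length count : Int) : Nat → Int
  | 0 => count
  | fuel+1 =>
    let num := pvGenSame digit length
    if HIGH < num then count
    else pvLoopA LOW HIGH digit (length + 1) (if LOW ≤ num then count + 1 else count) fuel

def count_symmetric_nums2 (LOW : Int) (HIGH : Int) : Int :=
  (PySem.List.pyRange 1 10 1).foldl (fun count digit => pvLoopA LOW HIGH digit 1 count 64) 0

-- ===== PORT B =====
-- the 'while R <= HIGH' loop of Source B; fuel is a pure totality guard as above
def pvLoopB (LOW HIGH : Int) (R count : Int) : Nat → Int
  | 0 => count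
  | fuel+1 =>
    if R ≤ HIGH then
      let lo := max 1 (-(PySem.Int.floordiv (-LOW) R))
      let hi := min 9 (PySem.Int.floordiv HIGH R)
      pvLoopB LOW HIGH (R * 10 + 1) (if lo ≤ hi then count + (hi - lo + 1) else count) fuel
    else count

def count_symmetric_nums2_alt (LOW : Int) (HIGH : Int) : Int :=
  pvLoopB LOW HIGH 1 0 64

-- ===== PRECONDITION & SPEC =====
def Spec_count_symmetric_nums2 (LOW : Int) (HIGH : Int) (out : Int) : Prop := out = count_symmetric_nums2_alt LOW HIGH
instance (LOW : Int) (HIGH : Int) (out : Int) : Decidable (Spec_count_symmetric_nums2 LOW HIGH out) := by unfold Spec_count_symmetric_nums2; infer_instance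

-- ===== CLAIM (what is proved, stated in full; the proofs are below) =====
def Claim_equal_count_symmetric_nums2 : Prop := ∀ (LOW : Int) (HIGH : Int), Dom_count_symmetric_nums2 LOW HIGH → Spec_count_symmetric_nums2 LOW HIGH (count_symmetric_nums2 LOW HIGH)

-- ===== LEMMAS AND PROOFS =====

-- repunit with L ones
def pvRep : Nat → Int
  | 0 => 0
  | n+1 => pvRep n * 10 + 1

-- the indicator "d·rep(L) lies in [LOW, HIGH]"
def pvInd (LOW HIGH d : Int) (L : Nat) : Int :=
  if LOW ≤ d * pvRep L ∧ d * pvRep L ≤ HIGH then 1 else 0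

-- the per-length closed-form count of Source B
def pvG (LOW HIGH : Int) (L : Nat) : Int :=
  let R := pvRep L
  let lo := max 1 (-(PySem.Int.floordiv (-LOW) R))
  let hi := min 9 (PySem.Int.floordiv HIGH R)
  if lo ≤ hi then hi - lo + 1 else 0

lemma pvRep_nonneg (n : Nat) : 0 ≤ pvRep n := by
  induction n with
  | zero => simp [pvRep]
  | succ n ih => simp only [pvRep]; omega

lemma pvRep_pos (n : Nat) : 0 < pvRep (n+1) := by
  have := pvRep_nonneg n; simp only [pvRep]; omega

lemma pvRep_mono {m n : Nat} (h : m ≤ n) : pvRep m ≤ pvRep n := by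
  induction n with
  | zero => simp_all
  | succ n ih =>
    rcases Nat.eq_or_lt_of_le h with rfl | h'
    · exact le_refl _
    · have h1 : pvRep m ≤ pvRep n := ih (by omega)
      have h2 := pvRep_nonneg n
      simp only [pvRep]; omega

lemma pvGenSame_eq (d : Int) (hd1 : 1 ≤ d) (hd9 : d ≤ 9) (L : Nat) (hL1 : 1 ≤ L) (hL : L ≤ 11) :
    pvGenSame d (L : Int) = d * pvRep L := by
  interval_cases d <;> interval_cases L <;> decide

lemma pvLoopA_eq (LOW HIGH d : Int) (hd1 : 1 ≤ d) (hd9 : d ≤ 9) :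
    ∀ (k L : Nat) (count : Int) (fuel : Nat), 1 ≤ L → L + k ≤ 11 → k + 1 ≤ fuel →
      HIGH < d * pvRep (L + k) →
      pvLoopA LOW HIGH d (L : Int) count fuel
        = count + ∑ i ∈ Finset.range k, pvInd LOW HIGH d (L + i) := by
  intro k
  induction k with
  | zero =>
    intro L count fuel hL1 hLk hf hHI
    obtain ⟨f, rfl⟩ : ∃ f, fuel = f + 1 := ⟨fuel - 1, by omega⟩
    have hg := pvGenSame_eq d hd1 hd9 L hL1 (by omega)
    simp only [pvLoopA, hg]
    rw [if_pos (by simpa using hHI)]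
    simp
  | succ k ih =>
    intro L count fuel hL1 hLk hf hHI
    obtain ⟨f, rfl⟩ : ∃ f, fuel = f + 1 := ⟨fuel - 1, by omega⟩
    have hg := pvGenSame_eq d hd1 hd9 L hL1 (by omega)
    simp only [pvLoopA, hg]
    by_cases hcase : HIGH < d * pvRep L
    · rw [if_pos hcase]
      have hz : ∀ i ∈ Finset.range (k+1), pvInd LOW HIGH d (L + i) = 0 := by
        intro i _
        have hmono : pvRep L ≤ pvRep (L + i) := pvRep_mono (by omega)
        have : d * pvRep L ≤ d * pvRep (L + i) :=
          mul_le_mul_of_nonneg_left hmono (by omega)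
        simp only [pvInd]
        rw [if_neg]; omega
      rw [Finset.sum_eq_zero hz]; ring
    · rw [if_neg hcase]
      have hcast : (L : Int) + 1 = ((L + 1 : Nat) : Int) := by push_cast; ring
      rw [hcast, ih (L+1) _ f (by omega) (by omega) (by omega) (by rw [show L+1+k = L+(k+1) by omega]; exact hHI)]
      rw [Finset.sum_range_succ' (fun i => pvInd LOW HIGH d (L + i)) k]
      have hind0 : pvInd LOW HIGH d (L + 0) = if LOW ≤ d * pvRep L then 1 else 0 := by
        simp only [pvInd, Nat.add_zero]
        by_cases hlow : LOW ≤ d * pvRep L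
        · rw [if_pos ⟨hlow, by omega⟩, if_pos hlow]
        · rw [if_neg (by tauto), if_neg hlow]
      have harg : ∀ i, L + 1 + i = L + (i + 1) := by omega
      simp only [harg]
      rw [hind0]
      by_cases hlow : LOW ≤ d * pvRep L <;> simp [hlow] <;> ring

lemma pvLoopB_eq (LOW HIGH : Int) :
    ∀ (k L : Nat) (count : Int) (fuel : Nat), 1 ≤ L → k + 1 ≤ fuel →
      HIGH < pvRep (L + k) →
      pvLoopB LOW HIGH (pvRep L) count fuel
        = count + ∑ i ∈ Finset.range k, pvG LOW HIGH (L + i) := by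
  intro k
  induction k with
  | zero =>
    intro L count fuel hL1 hf hHI
    obtain ⟨f, rfl⟩ : ∃ f, fuel = f + 1 := ⟨fuel - 1, by omega⟩
    simp only [pvLoopB]
    rw [if_neg (by simpa using not_le.mpr hHI)]
    simp
  | succ k ih =>
    intro L count fuel hL1 hf hHI
    obtain ⟨f, rfl⟩ : ∃ f, fuel = f + 1 := ⟨fuel - 1, by omega⟩
    simp only [pvLoopB]
    by_cases hcase : pvRep L ≤ HIGH
    · rw [if_pos hcase]
      have hstep : pvRep L * 10 + 1 = pvRep (L + 1) := by simp [pvRep]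
      rw [hstep, ih (L+1) _ f (by omega) (by omega) (by rw [show L+1+k = L+(k+1) by omega]; exact hHI)]
      rw [Finset.sum_range_succ' (fun i => pvG LOW HIGH (L + i)) k]
      have harg : ∀ i, L + 1 + i = L + (i + 1) := by omega
      simp only [harg, Nat.add_zero]
      simp only [pvG]
      split_ifs <;> ring
    · rw [if_neg hcase]
      have hz : ∀ i ∈ Finset.range (k+1), pvG LOW HIGH (L + i) = 0 := by
        intro i _
        have hmono : pvRep L ≤ pvRep (L + i) := pvRep_mono (by omega)
        have hRpos : 0 < pvRep (L + i) := by
          obtain ⟨L', hE⟩ : ∃ L', L + i = L' + 1 := ⟨L + i - 1, by omega⟩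
          rw [hE]; exact pvRep_pos L'
        have hfd : PySem.Int.floordiv HIGH (pvRep (L + i)) < 1 := by
          rw [PySem.Int.floordiv_lt_iff_lt_mul hRpos]; omega
        simp only [pvG]
        rw [if_neg]; omega
      rw [Finset.sum_eq_zero hz]; ring

lemma pvG_eq (LOW HIGH : Int) (L : Nat) (hL : 1 ≤ L) :
    pvG LOW HIGH L = ∑ d ∈ Finset.Icc (1 : Int) 9, pvInd LOW HIGH d L := by
  obtain ⟨L', hE⟩ : ∃ L', L = L' + 1 := ⟨L - 1, by omega⟩
  have hRpos : 0 < pvRep L := by rw [hE]; exact pvRep_pos L'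
  set R := pvRep L with hR
  set c : Int := -(PySem.Int.floordiv (-LOW) R) with hc
  set h : Int := PySem.Int.floordiv HIGH R with hh
  have hiff : ∀ d : Int, (LOW ≤ d * R ∧ d * R ≤ HIGH) ↔ (c ≤ d ∧ d ≤ h) := by
    intro d
    have h1 : c ≤ d ↔ LOW ≤ d * R := by
      rw [hc, neg_le, PySem.Int.le_floordiv_iff_mul_le hRpos, neg_mul, neg_le_neg_iff]
    have h2 : d ≤ h ↔ d * R ≤ HIGH := by
      rw [hh, PySem.Int.le_floordiv_iff_mul_le hRpos]
    rw [← h1, ← h2]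
  have hsum : ∑ d ∈ Finset.Icc (1 : Int) 9, pvInd LOW HIGH d L
      = ((Finset.Icc (1 : Int) 9).filter (fun d => c ≤ d ∧ d ≤ h)).card := by
    simp only [pvInd]
    rw [Finset.sum_boole, Finset.filter_congr (fun d _ => hiff d)]
  have hfilter : (Finset.Icc (1 : Int) 9).filter (fun d => c ≤ d ∧ d ≤ h)
      = Finset.Icc (max 1 c) (min 9 h) := by
    ext d
    simp [Finset.mem_filter, Finset.mem_Icc]
    omega
  rw [hsum, hfilter, Int.card_Icc]
  simp only [pvG]
  rw [← hR, ← hc, ← hh]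
  split_ifs with hle
  · omega
  · omega

theorem count_symmetric_nums2_spec : Claim_equal_count_symmetric_nums2 := by
  intro LOW HIGH hDom
  have hH : HIGH ≤ 2147483648 := by
    simp only [Dom_count_symmetric_nums2, pvDomInt, Bool.and_eq_true, decide_eq_true_eq] at hDom
    exact hDom.2.2
  have hrep11 : pvRep 11 = 11111111111 := by decide
  have hA : ∀ d : Int, 1 ≤ d → d ≤ 9 → ∀ c : Int,
      pvLoopA LOW HIGH d 1 c 64 = c + ∑ i ∈ Finset.range 10, pvInd LOW HIGH d (1 + i) := by
    intro d h1 h9 c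
    have hbig : HIGH < d * pvRep (1 + 10) := by
      have : (11111111111 : Int) ≤ d * 11111111111 := le_mul_of_one_le_left (by norm_num) h1
      rw [show pvRep (1 + 10) = 11111111111 from hrep11]
      omega
    have := pvLoopA_eq LOW HIGH d h1 h9 10 1 c 64 (by norm_num) (by norm_num) (by norm_num) hbig
    simpa using this
  have hB : count_symmetric_nums2_alt LOW HIGH = ∑ i ∈ Finset.range 10, pvG LOW HIGH (1 + i) := by
    have hbig : HIGH < pvRep (1 + 10) := by rw [show (1+10 : Nat) = 11 from rfl, hrep11]; omega
    have h1 : pvRep 1 = 1 := by decide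
    have := pvLoopB_eq LOW HIGH 10 1 0 64 (by norm_num) (by norm_num) hbig
    rw [h1] at this
    simpa [count_symmetric_nums2_alt] using this
  have hBsum : count_symmetric_nums2_alt LOW HIGH
      = ∑ d ∈ Finset.Icc (1 : Int) 9, ∑ i ∈ Finset.range 10, pvInd LOW HIGH d (1 + i) := by
    rw [hB, Finset.sum_comm]
    exact Finset.sum_congr rfl fun i _ => pvG_eq LOW HIGH (1 + i) (by omega)
  have hIcc : (Finset.Icc (1 : Int) 9) = {1, 2, 3, 4, 5, 6, 7, 8, 9} := by decide
  rw [Spec_count_symmetric_nums2, hBsum, hIcc]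
  have hRange : PySem.List.pyRange 1 10 1 = [1, 2, 3, 4, 5, 6, 7, 8, 9] := by decide
  simp only [count_symmetric_nums2, hRange, List.foldl]
  rw [hA 1 (by norm_num) (by norm_num), hA 2 (by norm_num) (by norm_num),
      hA 3 (by norm_num) (by norm_num), hA 4 (by norm_num) (by norm_num),
      hA 5 (by norm_num) (by norm_num), hA 6 (by norm_num) (by norm_num),
      hA 7 (by norm_num) (by norm_num), hA 8 (by norm_num) (by norm_num),
      hA 9 (by norm_num) (by norm_num)]
  rw [Finset.sum_insert (by decide), Finset.sum_insert (by decide), Finset.sum_insert (by decide),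
      Finset.sum_insert (by decide), Finset.sum_insert (by decide), Finset.sum_insert (by decide),
      Finset.sum_insert (by decide), Finset.sum_insert (by decide), Finset.sum_singleton]
  ring
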